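-- pv_equiv track=rewrite | github.com/igarashi20176/competitivePG | book/chap03/Ex3.4.py | division_even_count
-- ===== SOURCE A (Python) =====
-- def division_even_count( ary, cnt=0 ):
--     flg = True
--     conv_list = ary
--
--     for i in conv_list:
--         if i % 2:
--             flg =  False
--
--     if flg:
--         conv_list = list(map(lambda val: val // 2, conv_list))
--         return division_even_count(conv_list, cnt+1)
--     else:
--         return cnt
-- ===== SOURCE B (Python) =====
-- def division_even_count(ary, cnt=0):
--     # Answer = cnt + (minimum 2-adic valuation among the nonzero elements):
--     # compute each element's valuation once and take the min, instead of
--     # repeatedly halving the whole list.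
--     def v2(x):
--         k = 0
--         while x % 2 == 0:
--             x //= 2
--             k += 1
--         return k
--     return cnt + min(v2(x) for x in ary if x != 0)
-- ===== Notes on version B (the rewrite author's own statement) =====
-- stated objective: alternative
-- what changed: B computes each element's 2-adic valuation once and returns cnt plus the minimum over the nonzero elements, instead of A's repeated whole-list halving recursion.
import Mathlib
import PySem

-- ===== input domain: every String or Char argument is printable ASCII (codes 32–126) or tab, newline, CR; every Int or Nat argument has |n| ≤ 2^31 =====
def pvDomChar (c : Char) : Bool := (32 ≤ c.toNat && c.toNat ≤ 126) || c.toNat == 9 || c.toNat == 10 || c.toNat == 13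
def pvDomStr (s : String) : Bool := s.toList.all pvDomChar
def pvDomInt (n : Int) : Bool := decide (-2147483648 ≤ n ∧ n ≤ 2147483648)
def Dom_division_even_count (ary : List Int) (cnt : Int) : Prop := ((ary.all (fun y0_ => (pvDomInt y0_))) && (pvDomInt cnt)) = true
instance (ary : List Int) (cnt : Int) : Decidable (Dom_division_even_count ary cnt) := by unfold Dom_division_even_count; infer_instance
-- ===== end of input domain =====

-- B replaces A's repeated whole-list halving recursion by one pass computing each
-- nonzero element's 2-adic valuation and taking the minimum (objective: alternative algorithm).


-- ===== PORT A =====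
-- Python A diverges when every element is 0 (or the list is empty); the fuel below is a
-- totality guard only: on every input admitted by Pre_ it is proved sufficient.
def pvFuelA (ary : List Int) : Nat := ary.foldl (fun a x => a + x.natAbs) 0 + 1

def divGoA : Nat → List Int → Int → Int
  | 0, _, cnt => cnt
  | f+1, ary, cnt =>
    let flg := ary.foldl (fun flg i => if PySem.Int.mod i 2 ≠ 0 then false else flg) true
    if flg then divGoA f (ary.map (fun v => PySem.Int.floordiv v 2)) (cnt + 1)
    else cnt

def division_even_count (ary : List Int) (cnt : Int) : Int := divGoA (pvFuelA ary) ary cnt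

-- ===== PORT B =====
-- the while-loop of Source B's v2; the fuel is a totality guard (the loop diverges only at x = 0,
-- which B filters out); proved sufficient for every x ≠ 0.
def v2go : Nat → Int → Int → Int
  | 0, _, k => k
  | f+1, x, k => if PySem.Int.mod x 2 = 0 then v2go f (PySem.Int.floordiv x 2) (k + 1) else k

def pvV2 (x : Int) : Int := v2go (x.natAbs + 1) x 0

def division_even_count_alt (ary : List Int) (cnt : Int) : Int :=
  match PySem.List.min? ((ary.filter (fun x => x != 0)).map pvV2) (fun y => y) with
  | some m => cnt + m
  | none => 0   -- Python's min raises ValueError here; outside Pre_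

-- ===== PRECONDITION & SPEC =====
-- Pre_ excludes the arrays with no nonzero element (incl. the empty array): there Python A
-- recurses forever (RecursionError) and Python B raises ValueError from min().
def Pre_division_even_count (ary : List Int) (cnt : Int) : Prop := ∃ x ∈ ary, x ≠ 0
instance (ary : List Int) (_cnt : Int) : Decidable (Pre_division_even_count ary _cnt) := by unfold Pre_division_even_count; infer_instance
def pvWitness_division_even_count : List Int × Int := ([4, 6], 0)

def Spec_division_even_count (ary : List Int) (cnt : Int) (out : Int) : Prop := out = division_even_count_alt ary cnt
instance (ary : List Int) (cnt : Int) (out : Int) : Decidable (Spec_division_even_count ary cnt out) := by unfold Spec_division_even_count; infer_instance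

-- ===== CLAIM (what is proved, stated in full; the proofs are below) =====
def Claim_equal_division_even_count : Prop := ∀ (ary : List Int) (cnt : Int), Dom_division_even_count ary cnt → Pre_division_even_count ary cnt → Spec_division_even_count ary cnt (division_even_count ary cnt)

-- ===== LEMMAS AND PROOFS =====

-- proof-side specification: the 2-adic valuation of x (0 for odd x; meaningful for x ≠ 0)
def val2 (x : Int) : Nat :=
  if h : x ≠ 0 ∧ x % 2 = 0 then val2 (x / 2) + 1 else 0
termination_by x.natAbs
decreasing_by
  obtain ⟨hx, he⟩ := h
  obtain ⟨c, hc⟩ := Int.dvd_of_emod_eq_zero he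
  subst hc
  have hc0 : c ≠ 0 := by rintro rfl; simp at hx
  have : (2 * c) / 2 = c := by omega
  rw [this]
  simp [Int.natAbs_mul]
  omega

theorem val2_of_even {x : Int} (hx : x ≠ 0) (he : x % 2 = 0) : val2 x = val2 (x / 2) + 1 := by
  rw [val2]; simp [hx, he]

theorem val2_of_odd {x : Int} (he : x % 2 ≠ 0) : val2 x = 0 := by
  rw [val2]; simp [he]

theorem odd_of_val2_zero {x : Int} (hx : x ≠ 0) (h : val2 x = 0) : x % 2 ≠ 0 := by
  intro he
  rw [val2_of_even hx he] at h
  omega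

theorem half_ne_zero {x : Int} (hx : x ≠ 0) (he : x % 2 = 0) : x / 2 ≠ 0 := by
  obtain ⟨c, hc⟩ := Int.dvd_of_emod_eq_zero he
  subst hc
  have : (2 * c) / 2 = c := by omega
  rw [this]
  rintro rfl; simp at hx

theorem val2_le_natAbs : ∀ (x : Int), x ≠ 0 → val2 x ≤ x.natAbs := by
  intro x
  induction x using val2.induct with
  | case1 x h ih =>
    intro _
    obtain ⟨hx, he⟩ := h
    rw [val2_of_even hx he]
    obtain ⟨c, hc⟩ := Int.dvd_of_emod_eq_zero he
    subst hc
    have h2 : (2 * c) / 2 = c := by omega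
    rw [h2] at ih ⊢
    have hc0 : c ≠ 0 := by rintro rfl; simp at hx
    have := ih hc0
    simp [Int.natAbs_mul] at *
    omega
  | case2 x h =>
    intro hx
    have he : x % 2 ≠ 0 := by
      intro he; exact h ⟨hx, he⟩
    rw [val2_of_odd he]
    omega

-- bridges for the PySem primitives at divisor 2
theorem pymod2 (x : Int) : PySem.Int.mod x 2 = x % 2 :=
  PySem.Int.mod_eq_emod_of_pos (by norm_num)

theorem pydiv2 (x : Int) : PySem.Int.floordiv x 2 = x / 2 :=
  PySem.Int.floordiv_eq_ediv_of_pos (by norm_num)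

-- B's while loop computes val2
theorem v2go_eq : ∀ (f : Nat) (x : Int) (k : Int), x ≠ 0 → val2 x < f → v2go f x k = k + val2 x := by
  intro f
  induction f with
  | zero => intro x k _ h; omega
  | succ g ih =>
    intro x k hx h
    by_cases he : x % 2 = 0
    · have h2 := half_ne_zero hx he
      rw [val2_of_even hx he] at h ⊢
      simp only [v2go, pymod2, pydiv2, he, if_pos]
      rw [ih (x / 2) (k + 1) h2 (by omega)]
      push_cast; ring
    · rw [val2_of_odd he]
      simp only [v2go, pymod2, pydiv2, he, if_false]
      omega

theorem pvV2_eq {x : Int} (hx : x ≠ 0) : pvV2 x = (val2 x : Int) := by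
  have h := val2_le_natAbs x hx
  have := v2go_eq (x.natAbs + 1) x 0 hx (by omega)
  simpa [pvV2] using this

-- A's flg loop
theorem flg_eq : ∀ (ary : List Int) (init : Bool),
    ary.foldl (fun flg i => if PySem.Int.mod i 2 ≠ 0 then false else flg) init
      = (init && ary.all (fun i => i % 2 == 0)) := by
  intro ary
  induction ary with
  | nil => simp
  | cons a t ih =>
    intro init
    rw [List.foldl_cons, List.all_cons]
    have hstep : (if PySem.Int.mod a 2 ≠ 0 then false else init) = (init && (a % 2 == 0)) := by
      rw [pymod2]; by_cases h : a % 2 = 0 <;> simp [h]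
    rw [hstep, ih, Bool.and_assoc]

theorem foldl_sum_mono : ∀ (t : List Int) (init : Nat), init ≤ t.foldl (fun a y => a + y.natAbs) init := by
  intro t
  induction t with
  | nil => simp
  | cons b u ih =>
    intro init
    rw [List.foldl_cons]
    exact le_trans (by omega) (ih (init + b.natAbs))

theorem sum_fuel_ge : ∀ (ary : List Int) (init : Nat) (x : Int), x ∈ ary →
    x.natAbs ≤ ary.foldl (fun a y => a + y.natAbs) init := by
  intro ary
  induction ary with
  | nil => intro init x hx; simp at hx
  | cons a t ih =>
    intro init x hx
    rw [List.foldl_cons]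
    rcases List.mem_cons.mp hx with rfl | hx
    · exact le_trans (by omega) (foldl_sum_mono t (init + x.natAbs))
    · exact ih (init + a.natAbs) x hx

-- main induction: A's recursion returns cnt + (min valuation m)
theorem divGoA_eq : ∀ (f : Nat) (ary : List Int) (cnt : Int) (m : Nat),
    (∃ x ∈ ary, x ≠ 0 ∧ val2 x = m) →
    (∀ x ∈ ary, x ≠ 0 → m ≤ val2 x) →
    m < f →
    divGoA f ary cnt = cnt + m := by
  intro f
  induction f with
  | zero => intro ary cnt m _ _ h; omega
  | succ g ih =>
    intro ary cnt m h1 h2 hf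
    obtain ⟨x0, hx0m, hx00, hx0v⟩ := h1
    match m with
    | 0 =>
      have hodd := odd_of_val2_zero hx00 hx0v
      have : ¬ ary.all (fun i => i % 2 == 0) = true := by
        simp only [List.all_eq_true]
        intro hall
        exact hodd (by simpa using hall x0 hx0m)
      simp only [divGoA, flg_eq]
      simp [this]
    | s+1 =>
      have hall : ∀ i ∈ ary, i % 2 = 0 := by
        intro i hi
        by_cases hi0 : i = 0
        · subst hi0; decide
        · have := h2 i hi hi0
          by_contra hodd
          rw [val2_of_odd hodd] at this; omega
      have hflg : ary.all (fun i => i % 2 == 0) = true := by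
        simp only [List.all_eq_true]; intro i hi; simpa using hall i hi
      simp only [divGoA, flg_eq, Bool.true_and, hflg, if_pos]
      have hmap : ary.map (fun v => PySem.Int.floordiv v 2) = ary.map (fun v => v / 2) := by
        simp
      rw [hmap]
      have hx0e : x0 % 2 = 0 := hall x0 hx0m
      have h1' : ∃ y ∈ ary.map (fun v => v / 2), y ≠ 0 ∧ val2 y = s := by
        refine ⟨x0 / 2, List.mem_map_of_mem hx0m, half_ne_zero hx00 hx0e, ?_⟩
        have := val2_of_even hx00 hx0e
        omega
      have h2' : ∀ y ∈ ary.map (fun v => v / 2), y ≠ 0 → s ≤ val2 y := by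
        intro y hy hy0
        obtain ⟨x, hxm, rfl⟩ := List.mem_map.mp hy
        have hx0 : x ≠ 0 := by rintro rfl; simp at hy0
        have hxe : x % 2 = 0 := hall x hxm
        have := h2 x hxm hx0
        have := val2_of_even hx0 hxe
        omega
      rw [ih _ (cnt + 1) s h1' h2' (by omega)]
      push_cast; ring

-- ===== VERDICT (by name: the statement is the Claim_ definition above) =====
theorem division_even_count_spec : Claim_equal_division_even_count := by
  intro ary cnt _ hpre
  obtain ⟨z, hzm, hz0⟩ := hpre
  unfold Spec_division_even_count division_even_count_alt
  have hne : (ary.filter (fun x => x != 0)).map pvV2 ≠ [] := by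
    simp only [ne_eq, List.map_eq_nil_iff, List.filter_eq_nil_iff]
    intro h
    exact h z hzm (by simpa using hz0)
  obtain ⟨m0, hm0⟩ : ∃ m0, PySem.List.min? ((ary.filter (fun x => x != 0)).map pvV2) (fun y => y) = some m0 := by
    cases h : PySem.List.min? ((ary.filter (fun x => x != 0)).map pvV2) (fun y => y) with
    | none => exact absurd ((PySem.List.min?_eq_none_iff _ _).mp h) hne
    | some m => exact ⟨m, rfl⟩
  rw [hm0]
  have hmem := PySem.List.min?_mem hm0
  have hmin := PySem.List.min?_isMin hm0
  obtain ⟨x0, hx0f, hx0v⟩ := List.mem_map.mp hmem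
  have hx0m : x0 ∈ ary := List.mem_of_mem_filter hx0f
  have hx00 : x0 ≠ 0 := by simpa using List.of_mem_filter hx0f
  have hm0v : m0 = (val2 x0 : Int) := by rw [← hx0v, pvV2_eq hx00]
  have h1 : ∃ x ∈ ary, x ≠ 0 ∧ val2 x = val2 x0 := ⟨x0, hx0m, hx00, rfl⟩
  have h2 : ∀ x ∈ ary, x ≠ 0 → val2 x0 ≤ val2 x := by
    intro x hx hx0
    have hxf : x ∈ ary.filter (fun x => x != 0) := List.mem_filter.mpr ⟨hx, by simpa⟩
    have := hmin (pvV2 x) (List.mem_map_of_mem hxf)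
    rw [pvV2_eq hx0, ← hx0v, pvV2_eq hx00] at this
    exact_mod_cast this
  have hfuel : val2 x0 < pvFuelA ary := by
    have h1 := val2_le_natAbs x0 hx00
    have h2 := sum_fuel_ge ary 0 x0 hx0m
    unfold pvFuelA
    omega
  rw [division_even_count, divGoA_eq (pvFuelA ary) ary cnt (val2 x0) h1 h2 hfuel, hm0v]
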